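-- pv_equiv track=rewrite | github.com/pypi-data/pypi-mirror-395 | packages/comictagger/comictagger-1.6.0b11.dev0-py3-none-any.whl/comictaggerlib/filerenamer.py | strip_internal
-- ===== SOURCE A (Python) =====
-- def strip_internal(string: str) -> str:
--     s = list(string)
--     p = False
--     for i, x in reversed(list(enumerate(s))):
--         if p and x.isspace():
--             del s[i]
--         p = x.isspace()
--     return "".join(s)
-- ===== SOURCE B (Python) =====
-- def strip_internal(string: str) -> str:
--     # Split the string into maximal runs of same isspace-class, then reduce
--     # each whitespace run to its last character.
--     out = []
--     i = 0
--     n = len(string)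
--     while i < n:
--         j = i + 1
--         while j < n and string[j].isspace() == string[i].isspace():
--             j += 1
--         out.append(string[j - 1] if string[i].isspace() else string[i:j])
--         i = j
--     return "".join(out)
-- ===== Notes on version B (the rewrite author's own statement) =====
-- stated objective: alternative
-- what changed: B partitions the string once into maximal runs of same whitespace-class and emits each non-space run whole and only the last character of each whitespace run, instead of A's reverse scan over an enumerated copy that deletes characters in place.
import Mathlib
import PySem

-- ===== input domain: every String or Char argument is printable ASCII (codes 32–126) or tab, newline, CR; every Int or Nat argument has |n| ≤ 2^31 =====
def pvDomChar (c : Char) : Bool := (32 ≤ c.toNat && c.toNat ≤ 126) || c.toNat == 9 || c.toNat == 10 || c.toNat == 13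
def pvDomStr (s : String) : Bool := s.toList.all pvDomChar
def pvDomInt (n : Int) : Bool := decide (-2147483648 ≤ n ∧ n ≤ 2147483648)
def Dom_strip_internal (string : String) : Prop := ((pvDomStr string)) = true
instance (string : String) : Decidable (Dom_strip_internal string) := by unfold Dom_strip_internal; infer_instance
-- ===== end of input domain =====

set_option maxRecDepth 8000


-- B replaces A's reverse in-place-deletion scan by a single forward partition
-- into whitespace-class runs, keeping only the last character of each
-- whitespace run (objective: alternative decomposition, same result).

-- ===== PORT A =====
-- for i, x in reversed(list(enumerate(s))): if p and x.isspace(): del s[i]; p = x.isspace()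
def aGo : List (Int × Char) → List Char → Bool → List Char
  | [], s, _ => s
  | (i, x) :: rest, s, p =>
      let s' := if p && PySem.Chars.isspace x then s.eraseIdx i.toNat else s
      -- i.toNat is exact: enumerate produces only non-negative indices
      aGo rest s' (PySem.Chars.isspace x)

def strip_internal (string : String) : String :=
  String.ofList (aGo ((PySem.List.enumerate string.toList).reverse) string.toList false)

-- ===== PORT B =====
-- while i < n: extend j over the run of same isspace-class; emit the run
-- (whole if non-space, else its last character only); continue at j.
def altGo : List Char → List Char
  | [] => []
  | x :: rest =>
      (if PySem.Chars.isspace x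
       then [(x :: rest.takeWhile (fun c => PySem.Chars.isspace c == PySem.Chars.isspace x)).getLast (by simp)]
       else x :: rest.takeWhile (fun c => PySem.Chars.isspace c == PySem.Chars.isspace x))
      ++ altGo (rest.dropWhile (fun c => PySem.Chars.isspace c == PySem.Chars.isspace x))
termination_by l => l.length
decreasing_by
  simp only [List.length_cons]
  exact Nat.lt_succ_of_le (List.length_dropWhile_le _ _)

def strip_internal_alt (string : String) : String := String.ofList (altGo string.toList)

-- ===== PRECONDITION & SPEC =====
def Spec_strip_internal (string : String) (out : String) : Prop := out = strip_internal_alt string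
instance (string : String) (out : String) : Decidable (Spec_strip_internal string out) := by unfold Spec_strip_internal; infer_instance

-- ===== CLAIM (what is proved, stated in full; the proofs are below) =====
def Claim_equal_strip_internal : Prop := ∀ (string : String), Dom_strip_internal string → Spec_strip_internal string (strip_internal string)

-- ===== LEMMAS AND PROOFS =====

-- the common characterisation: keep each character unless it and its right
-- neighbour are both whitespace
def fspec : List Char → List Char
  | [] => []
  | [x] => [x]
  | x :: y :: t =>
      if PySem.Chars.isspace x && PySem.Chars.isspace y then fspec (y :: t)
      else x :: fspec (y :: t)

lemma fspec_ws_run (x : Char) (r t : List Char) (hx : PySem.Chars.isspace x = true)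
    (hr : ∀ c ∈ r, PySem.Chars.isspace c = true)
    (ht : ∀ y ∈ t.head?, PySem.Chars.isspace y = false) :
    fspec (x :: r ++ t) = (x :: r).getLast (by simp) :: fspec t := by
  induction r generalizing x with
  | nil =>
      cases t with
      | nil => simp [fspec]
      | cons y t' =>
          have hy : PySem.Chars.isspace y = false := ht y (by simp)
          simp [fspec, hy]
  | cons z r' ih =>
      have hz : PySem.Chars.isspace z = true := hr z (by simp)
      have := ih z (hz) (fun c hc => hr c (by simp [hc]))
      simp only [List.cons_append] at this ⊢
      rw [fspec, if_pos (by simp [hx, hz])]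
      rw [this]
      congr 1

lemma fspec_nonws_run (x : Char) (r t : List Char) (hx : PySem.Chars.isspace x = false)
    (hr : ∀ c ∈ r, PySem.Chars.isspace c = false) :
    fspec (x :: r ++ t) = x :: r ++ fspec t := by
  induction r generalizing x with
  | nil =>
      cases t with
      | nil => simp [fspec]
      | cons y t' => simp [fspec, hx]
  | cons z r' ih =>
      have hz : PySem.Chars.isspace z = false := hr z (by simp)
      have := ih z hz (fun c hc => hr c (by simp [hc]))
      simp only [List.cons_append] at this ⊢
      rw [fspec, if_neg (by simp [hx]), this]

lemma altGo_eq_fspec (l : List Char) : altGo l = fspec l := by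
  induction l using altGo.induct with
  | case1 => simp [altGo, fspec]
  | case2 x rest ih =>
      set P := fun c => PySem.Chars.isspace c == PySem.Chars.isspace x with hP
      rw [altGo, ih]
      have hdecomp : x :: rest = x :: rest.takeWhile P ++ rest.dropWhile P := by
        simp [List.takeWhile_append_dropWhile]
      conv_rhs => rw [hdecomp]
      by_cases hx : PySem.Chars.isspace x = true
      · have hr : ∀ c ∈ rest.takeWhile P, PySem.Chars.isspace c = true := by
          intro c hc
          have := List.mem_takeWhile_imp hc
          simpa [hP, hx] using this
        have ht : ∀ y ∈ (rest.dropWhile P).head?, PySem.Chars.isspace y = false := by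
          intro y hy
          cases htail : rest.dropWhile P with
          | nil => simp [htail] at hy
          | cons z t' =>
              have hz : ¬ P z = true := by
                have := List.head?_dropWhile_not P rest
                rw [htail] at this
                simpa using this
              simp [htail] at hy
              subst hy
              simpa [hP, hx] using hz
        rw [if_pos hx, fspec_ws_run x (rest.takeWhile P) (rest.dropWhile P) hx hr ht]
        simp [hP]
      · have hx' : PySem.Chars.isspace x = false := by simpa using hx
        have hr : ∀ c ∈ rest.takeWhile P, PySem.Chars.isspace c = false := by
          intro c hc
          have := List.mem_takeWhile_imp hc
          simpa [hP, hx'] using this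
        rw [if_neg hx, fspec_nonws_run x (rest.takeWhile P) (rest.dropWhile P) hx' hr]

-- A-side: the state after processing all indices ≥ k
def pAt (s0 : List Char) (k : Nat) : Bool :=
  ((s0.drop k).head?.map PySem.Chars.isspace).getD false

lemma eraseIdx_concat_self {α : Type} (l : List α) (a : α) :
    (l ++ [a]).eraseIdx l.length = l := by
  induction l with
  | nil => simp
  | cons b l ih => simp [ih]

lemma aGo_inv (s0 : List Char) (k : Nat) (hk : k ≤ s0.length) :
    aGo ((PySem.List.enumerate s0).take k).reverse
        (s0.take k ++ fspec (s0.drop k)) (pAt s0 k) = fspec s0 := by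
  induction k with
  | zero => simp [aGo, pAt]
  | succ k ih =>
      have hk' : k < s0.length := hk
      have hkle : k ≤ s0.length := le_of_lt hk'
      have hlen : k < (PySem.List.enumerate s0).length := by
        simpa [PySem.List.length_enumerate] using hk'
      have htake : ((PySem.List.enumerate s0).take (k+1)).reverse
          = ((0 : Int) + k, s0[k]) :: ((PySem.List.enumerate s0).take k).reverse := by
        rw [List.take_add_one, List.getElem?_eq_getElem hlen]
        rw [PySem.List.getElem_enumerate]
        simp only [Option.toList_some, List.reverse_append, List.reverse_cons,
          List.reverse_nil, List.nil_append, List.singleton_append]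
      have hdropk : s0.drop k = s0[k] :: s0.drop (k+1) :=
        List.drop_eq_getElem_cons hk'
      have htakek : s0.take (k+1) = s0.take k ++ [s0[k]] :=
        List.take_succ_eq_append_getElem hk'
      rw [htake, aGo]
      have hp : pAt s0 k = PySem.Chars.isspace s0[k] := by
        unfold pAt
        rw [hdropk]
        rfl
      by_cases hb : (pAt s0 (k+1) && PySem.Chars.isspace s0[k]) = true
      · rw [if_pos hb]
        -- s0[k] and its right neighbour are both whitespace
        rw [Bool.and_eq_true] at hb
        obtain ⟨hb1, hxk⟩ := hb
        obtain ⟨y, t', hdrop1⟩ : ∃ y t', s0.drop (k+1) = y :: t' := by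
          cases hd : s0.drop (k+1) with
          | nil => simp [pAt, hd] at hb1
          | cons y t' => exact ⟨y, t', rfl⟩
        have hy : PySem.Chars.isspace y = true := by
          simpa [pAt, hdrop1] using hb1
        have herase : (s0.take (k+1) ++ fspec (s0.drop (k+1))).eraseIdx ((0:Int)+k).toNat
            = s0.take k ++ fspec (s0.drop k) := by
          have hlt : ((0:Int)+k).toNat < (s0.take (k+1)).length := by
            simp [List.length_take]
            omega
          rw [List.eraseIdx_append_of_lt_length hlt]
          congr 1
          · rw [htakek]
            have : ((0:Int)+k).toNat = (s0.take k).length := by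
              simp [List.length_take]; omega
            rw [this, eraseIdx_concat_self]
          · rw [hdropk, hdrop1, fspec, if_pos (by simp [hxk, hy])]
        rw [herase, ← hp]
        exact ih hkle
      · rw [if_neg hb]
        have hsame : s0.take (k+1) ++ fspec (s0.drop (k+1)) = s0.take k ++ fspec (s0.drop k) := by
        -- the head of drop k is kept by fspec
          cases hd : s0.drop (k+1) with
          | nil =>
              rw [hdropk, hd, htakek]
              simp only [fspec, List.append_nil]
          | cons y t' =>
              have hcond : (PySem.Chars.isspace s0[k] && PySem.Chars.isspace y) = false := by
                have h2 : (pAt s0 (k+1) && PySem.Chars.isspace s0[k]) = false := by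
                  simpa using hb
                simp only [pAt, hd] at h2
                cases hky : PySem.Chars.isspace s0[k] <;>
                  cases hyy : PySem.Chars.isspace y <;> simp_all
              rw [hdropk, hd, fspec,
                if_neg (fun h => Bool.false_ne_true (hcond.symm.trans h))]
              rw [htakek]
              simp only [List.append_assoc, List.singleton_append]
        rw [hsame, ← hp]
        exact ih hkle

lemma aGo_eq_fspec (s0 : List Char) :
    aGo ((PySem.List.enumerate s0).reverse) s0 false = fspec s0 := by
  have h := aGo_inv s0 s0.length (le_refl _)
  have h1 : (PySem.List.enumerate s0).take s0.length = PySem.List.enumerate s0 := by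
    apply List.take_of_length_le
    simp [PySem.List.length_enumerate]
  have h2 : pAt s0 s0.length = false := by simp [pAt]
  simpa [h1, h2, fspec] using h

-- ===== VERDICT (by name: the statement is the Claim_ definition above) =====
theorem strip_internal_spec : Claim_equal_strip_internal := by
  intro string _
  unfold Spec_strip_internal strip_internal strip_internal_alt
  rw [aGo_eq_fspec, altGo_eq_fspec]
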